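-- pv_equiv track=rewrite | github.com/Joshuavtk/AI | week 4/E.py | count3
-- ===== SOURCE A (Python) =====
-- def count3(n, just_stood_still = True):
--     if n <= 0:
--         return 1
--
--     if just_stood_still:
--         return 4 * count3(n - 1, False)
--
--     # sum = count3(n-1, False) # repeat
--     sum = count3(n-1, False) # repeat
--     sum += count3(n-1, True) # stay
--     return sum
-- ===== SOURCE B (Python) =====
-- def count3(n, just_stood_still = True):
--     # Iterative two-state DP: a = count with just_stood_still=False, b = with True.
--     a = b = 1
--     for _ in range(n):
--         a, b = a + b, 4 * a
--     return b if just_stood_still else a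
-- ===== Notes on version B (the rewrite author's own statement) =====
-- stated objective: faster
-- what changed: Replaces the exponential branching recursion with an iterative two-state dynamic program (a,b) updated n times in one loop; intended as asymptotically faster (a timing run read large speedups at the largest size A still finished, but A timed out beyond, so the label stays unconfirmed).
import Mathlib
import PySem

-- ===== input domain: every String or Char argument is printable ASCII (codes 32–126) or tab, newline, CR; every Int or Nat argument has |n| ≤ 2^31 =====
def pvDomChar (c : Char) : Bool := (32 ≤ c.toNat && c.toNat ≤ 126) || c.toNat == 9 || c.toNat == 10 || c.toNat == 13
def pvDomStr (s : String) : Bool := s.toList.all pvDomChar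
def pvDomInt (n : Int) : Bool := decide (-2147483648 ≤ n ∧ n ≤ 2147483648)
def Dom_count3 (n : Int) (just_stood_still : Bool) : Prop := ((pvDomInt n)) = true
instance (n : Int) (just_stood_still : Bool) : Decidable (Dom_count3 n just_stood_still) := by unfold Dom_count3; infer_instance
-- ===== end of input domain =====

-- B replaces A's exponential branching recursion by an iterative two-state DP loop; intended as faster; a timing run read a large speedup at the largest size A still finished (unconfirmed beyond, A times out).


-- ===== PORT A =====
-- literal transliteration of A's branching recursion (terminates because n.toNat decreases)
def count3 (n : Int) (just_stood_still : Bool) : Int :=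
  if n ≤ 0 then 1
  else if just_stood_still then 4 * count3 (n - 1) false
  else count3 (n - 1) false + count3 (n - 1) true
termination_by n.toNat
decreasing_by all_goals (simp_wf; omega)

-- ===== PORT B =====
-- the loop 'for _ in range(n): a, b = a + b, 4 * a' run k times from (1, 1)
def altLoop : Nat → Int × Int
  | 0 => (1, 1)
  | k + 1 => let p := altLoop k; (p.1 + p.2, 4 * p.1)

def count3_alt (n : Int) (just_stood_still : Bool) : Int :=
  let p := altLoop n.toNat
  if just_stood_still then p.2 else p.1

-- ===== PRECONDITION & SPEC =====
-- Pre_ excludes n at or above CPython's default recursion limit, where A's immediate n-deep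
-- first-branch descent raises RecursionError before returning anything; B returns there.
def Pre_count3 (n : Int) (just_stood_still : Bool) : Prop := n < 997
instance (n : Int) (just_stood_still : Bool) : Decidable (Pre_count3 n just_stood_still) := by unfold Pre_count3; infer_instance
def pvWitness_count3 : Int × Bool := (5, true)

def Spec_count3 (n : Int) (just_stood_still : Bool) (out : Int) : Prop := out = count3_alt n just_stood_still
instance (n : Int) (just_stood_still : Bool) (out : Int) : Decidable (Spec_count3 n just_stood_still out) := by unfold Spec_count3; infer_instance

-- ===== CLAIM (what is proved, stated in full; the proofs are below) =====
def Claim_equal_count3 : Prop := ∀ (n : Int) (just_stood_still : Bool), Dom_count3 n just_stood_still → Pre_count3 n just_stood_still → Spec_count3 n just_stood_still (count3 n just_stood_still)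

-- ===== LEMMAS AND PROOFS =====

theorem count3_nonpos (n : Int) (b : Bool) (h : n ≤ 0) : count3 n b = 1 := by
  rw [count3]; simp [h]

theorem count3_nat (k : Nat) :
    count3 (k : Int) false = (altLoop k).1 ∧ count3 (k : Int) true = (altLoop k).2 := by
  induction k with
  | zero => constructor <;> (rw [count3]; simp [altLoop])
  | succ m ih =>
    have hpos : ¬ ((m + 1 : Nat) : Int) ≤ 0 := by push_cast; omega
    have hm : ((m + 1 : Nat) : Int) - 1 = (m : Int) := by push_cast; ring
    constructor
    · rw [count3]; simp only [hpos, if_false, hm, altLoop]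
      simp [ih.1, ih.2]
    · rw [count3]; simp only [hpos, if_false, hm, altLoop]
      simp [ih.1]

-- ===== VERDICT (by name: the statement is the Claim_ definition above) =====
theorem count3_spec : Claim_equal_count3 := by
  intro n b _ _
  unfold Spec_count3 count3_alt
  by_cases h : n ≤ 0
  · have : n.toNat = 0 := by omega
    rw [count3_nonpos n b h, this]
    cases b <;> simp [altLoop]
  · have hn : ((n.toNat : Nat) : Int) = n := by omega
    have h1 := (count3_nat n.toNat).1
    have h2 := (count3_nat n.toNat).2
    rw [hn] at h1 h2
    cases b <;> simp [h1, h2]
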